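-- pv_equiv track=rewrite | github.com/mai-nakagawa/nand2tetris | 06/Assembler.py | dest
-- ===== SOURCE A (Python) =====
-- def dest(mnemonic: str) -> str:
--     d1 = 0
--     d2 = 0
--     d3 = 0
--     for c in mnemonic:
--         if c == "A":
--             d1 = 1
--         elif c == "D":
--             d2 = 1
--         elif c == "M":
--             d3 = 1
--     return f"{d1}{d2}{d3}"
-- ===== SOURCE B (Python) =====
-- def dest(mnemonic: str) -> str:
--     code = {"A": 4, "D": 2, "M": 1}
--     bits = sum(code.get(c, 0) for c in set(mnemonic))
--     return format(bits, "03b")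
-- ===== Notes on version B (the rewrite author's own statement) =====
-- stated objective: alternative
-- what changed: Replaced the three boolean flags and if/elif dispatch by a bitmask encoding: each dest letter carries a bit weight (A=4, D=2, M=1), the weights are summed over the deduplicated character set, and the result is printed as one 3-digit binary number (constant-factor speedup from set()/sum builtins replacing the per-character interpreted loop).
import Mathlib
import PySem

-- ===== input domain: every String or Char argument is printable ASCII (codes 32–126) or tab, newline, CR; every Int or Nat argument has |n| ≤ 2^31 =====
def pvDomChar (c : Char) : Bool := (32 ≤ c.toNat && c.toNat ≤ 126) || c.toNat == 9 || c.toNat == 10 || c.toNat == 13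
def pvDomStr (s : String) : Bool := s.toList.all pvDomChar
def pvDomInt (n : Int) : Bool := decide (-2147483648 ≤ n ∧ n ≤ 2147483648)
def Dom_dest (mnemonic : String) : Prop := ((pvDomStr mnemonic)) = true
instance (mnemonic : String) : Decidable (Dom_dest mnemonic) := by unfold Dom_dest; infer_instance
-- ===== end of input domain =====

-- B replaces the three boolean flags and if/elif dispatch by a bitmask: bit weights A=4, D=2, M=1
-- summed over the deduplicated character set, printed as one 3-digit binary number (objective: alternative).

-- ===== PORT A =====
-- the loop over mnemonic with state (d1,d2,d3), branches in A's order
def destLoop (st : Int × Int × Int) (c : Char) : Int × Int × Int :=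
  if c = 'A' then (1, st.2.1, st.2.2)
  else if c = 'D' then (st.1, 1, st.2.2)
  else if c = 'M' then (st.1, st.2.1, 1)
  else st

def dest (mnemonic : String) : String :=
  let st := mnemonic.toList.foldl destLoop (0, 0, 0)
  PySem.Int.toStr st.1 ++ PySem.Int.toStr st.2.1 ++ PySem.Int.toStr st.2.2

-- ===== PORT B =====
-- code = {"A": 4, "D": 2, "M": 1}
def destCode : PySem.Dict Char Int := PySem.Dict.ofList [('A', 4), ('D', 2), ('M', 1)]

-- hand port of format(bits, "03b"); exact for 0 ≤ bits ≤ 7 (B's bits is a sum of distinct weights 4,2,1)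
def destBin3 (bits : Int) : String :=
  PySem.Int.toStr (PySem.Int.floordiv bits 4)
    ++ PySem.Int.toStr (PySem.Int.mod (PySem.Int.floordiv bits 2) 2)
    ++ PySem.Int.toStr (PySem.Int.mod bits 2)

def dest_alt (mnemonic : String) : String :=
  let bits : Int :=
    (PySem.Set.ofList mnemonic.toList).foldl (fun b c => b + destCode.getD c 0) 0
  destBin3 bits

-- ===== PRECONDITION & SPEC =====
def Spec_dest (mnemonic : String) (out : String) : Prop := out = dest_alt mnemonic
instance (mnemonic : String) (out : String) : Decidable (Spec_dest mnemonic out) := by unfold Spec_dest; infer_instance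

-- ===== CLAIM (what is proved, stated in full; the proofs are below) =====
def Claim_equal_dest : Prop := ∀ (mnemonic : String), Dom_dest mnemonic → Spec_dest mnemonic (dest mnemonic)

-- ===== LEMMAS AND PROOFS =====
-- A's loop invariant: each flag is 1 iff its letter occurred (or it started at 1)
theorem destLoop_foldl (l : List Char) (a b c : Int) :
    l.foldl destLoop (a, b, c) =
      ((if l.contains 'A' then 1 else a),
       (if l.contains 'D' then 1 else b),
       (if l.contains 'M' then 1 else c)) := by
  induction l generalizing a b c with
  | nil => simp
  | cons x xs ih =>
    simp only [List.foldl_cons, destLoop, List.contains_cons]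
    by_cases hA : x = 'A'
    · subst hA; simp [ih]
    · by_cases hD : x = 'D'
      · subst hD; simp [ih, hA]
      · by_cases hM : x = 'M'
        · subst hM; simp [ih, hA, hD]
        · simp [hA, hD, hM, ih]
          refine ⟨?_, ?_, ?_⟩
          · congr 1; simp [Ne.symm hA]
          · congr 1; simp [Ne.symm hD]
          · congr 1; simp [Ne.symm hM]

-- the bit weight B's dict assigns to each character
theorem destCode_getD (x : Char) :
    destCode.getD x 0 =
      if x = 'A' then 4 else if x = 'D' then 2 else if x = 'M' then 1 else 0 := by
  by_cases hA : x = 'A'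
  · subst hA; decide
  by_cases hD : x = 'D'
  · subst hD; decide
  by_cases hM : x = 'M'
  · subst hM; decide
  simp [destCode, PySem.Dict.ofList, PySem.Dict.update, PySem.Dict.getD_insert, hA, hD, hM,
    PySem.Dict.getD_empty]

-- B's sum over a duplicate-free list equals the weighted membership indicators
theorem destSum_nodup (l : List Char) (b : Int) (h : l.Nodup) :
    l.foldl (fun b c => b + destCode.getD c 0) b =
      b + (if 'A' ∈ l then 4 else 0) + (if 'D' ∈ l then 2 else 0)
        + (if 'M' ∈ l then 1 else 0) := by
  induction l generalizing b with
  | nil => simp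
  | cons x xs ih =>
    obtain ⟨hx, hxs⟩ := List.nodup_cons.mp h
    simp only [List.foldl_cons]
    rw [ih _ hxs]
    simp only [destCode_getD, List.mem_cons]
    by_cases hA : x = 'A' <;> by_cases hD : x = 'D' <;> by_cases hM : x = 'M' <;>
      subst_vars <;> simp_all <;>
      first
        | (split_ifs <;> omega)
        | simp [Ne.symm hA, Ne.symm hD, Ne.symm hM]

-- ===== VERDICT (by name: the statement is the Claim_ definition above) =====
theorem dest_spec : Claim_equal_dest := by
  intro m _
  unfold Spec_dest dest dest_alt
  rw [destLoop_foldl,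
      destSum_nodup _ _ (PySem.Set.nodup_ofList m.toList)]
  simp only [PySem.Set.mem_ofList]
  by_cases hA : 'A' ∈ m.toList <;> by_cases hD : 'D' ∈ m.toList <;>
    by_cases hM : 'M' ∈ m.toList <;>
    simp [hA, hD, hM] <;> decide
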